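-- pv_equiv track=rewrite | github.com/cortexuvula/Medical-Assistant | src/ui/components/analysis_panel_formatter.py | _detect_severity
-- ===== SOURCE A (Python) =====
-- from typing import Dict, Optional
--
-- def _detect_severity(line: str) -> Optional[str]:
--     """Detect drug interaction severity in line.
--
--     Args:
--         line: The line to check
--
--     Returns:
--         Severity level string or None
--     """
--     lower = line.lower()
--
--     # Check for contraindicated
--     if any(term in lower for term in [
--         'contraindicated', 'do not use', 'avoid combination',
--         'never use together', 'absolute contraindication'
--     ]):
--         return 'contraindicated'
--
--     # Check for major severity
--     if any(term in lower for term in ['[major]', 'severity: major', 'major interaction']):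
--         return 'major'
--     if 'major' in lower and any(term in lower for term in ['interaction', 'severity', 'risk']):
--         return 'major'
--
--     # Check for moderate severity
--     if any(term in lower for term in ['[moderate]', 'severity: moderate', 'moderate interaction']):
--         return 'moderate'
--     if 'moderate' in lower and any(term in lower for term in ['interaction', 'severity', 'risk']):
--         return 'moderate'
--
--     # Check for minor severity
--     if any(term in lower for term in ['[minor]', 'severity: minor', 'minor interaction']):
--         return 'minor'
--     if 'minor' in lower and any(term in lower for term in ['interaction', 'severity', 'risk']):
--         return 'minor'
--
--     return None
-- ===== SOURCE B (Python) =====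
-- from typing import Dict, Optional
--
-- def _detect_severity(line: str) -> Optional[str]:
--     """Detect drug interaction severity in line (subsumption-pruned version).
--
--     Since 'severity: X' in lower implies both 'X' and 'severity' in lower, and
--     'X interaction' implies 'X' and 'interaction' in lower, A's explicit phrase
--     checks for each level collapse to just the '[X]' bracket tag plus the
--     keyword+context rule, with the context flag computed once and shared.
--     """
--     lower = line.lower()
--     if any(term in lower for term in (
--             'contraindicated', 'do not use', 'avoid combination',
--             'never use together', 'absolute contraindication')):
--         return 'contraindicated'
--     has_context = any(w in lower for w in ('interaction', 'severity', 'risk'))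
--     for level in ('major', 'moderate', 'minor'):
--         if f'[{level}]' in lower or (level in lower and has_context):
--             return level
--     return None
-- ===== Notes on version B (the rewrite author's own statement) =====
-- stated objective: simpler
-- what changed: B prunes A's explicit-phrase lists by subsumption (each 'severity: <level>' and '<level> interaction' phrase already implies the keyword+context rule), keeping per level only the bracketed tag, computing the shared context flag once, and handling the three levels in one short loop.
import Mathlib
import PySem

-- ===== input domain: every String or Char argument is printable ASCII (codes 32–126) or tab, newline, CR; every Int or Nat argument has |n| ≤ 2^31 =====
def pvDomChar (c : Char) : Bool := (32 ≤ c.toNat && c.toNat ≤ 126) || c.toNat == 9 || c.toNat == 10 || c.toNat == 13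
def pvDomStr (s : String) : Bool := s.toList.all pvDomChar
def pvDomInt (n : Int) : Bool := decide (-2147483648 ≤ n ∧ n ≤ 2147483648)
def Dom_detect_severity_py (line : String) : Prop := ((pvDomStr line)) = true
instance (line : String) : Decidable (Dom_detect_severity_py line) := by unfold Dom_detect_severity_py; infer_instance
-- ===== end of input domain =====

-- B prunes A's per-level phrase lists by subsumption ('severity: X' and 'X interaction'
-- each imply the keyword+context rule), keeping only the '[X]' tag, computes the context
-- flag once, and handles the three levels with one short loop (objective: simpler).

-- ===== PORT A =====
def detect_severity_py (line : String) : Option String :=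
  let lower := PySem.Str.lower line
  if ["contraindicated", "do not use", "avoid combination",
      "never use together", "absolute contraindication"].any
        (fun term => PySem.Str.isIn term lower) then
    some "contraindicated"
  else if ["[major]", "severity: major", "major interaction"].any
        (fun term => PySem.Str.isIn term lower) then
    some "major"
  else if PySem.Str.isIn "major" lower &&
      ["interaction", "severity", "risk"].any (fun term => PySem.Str.isIn term lower) then
    some "major"
  else if ["[moderate]", "severity: moderate", "moderate interaction"].any
        (fun term => PySem.Str.isIn term lower) then
    some "moderate"
  else if PySem.Str.isIn "moderate" lower &&
      ["interaction", "severity", "risk"].any (fun term => PySem.Str.isIn term lower) then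
    some "moderate"
  else if ["[minor]", "severity: minor", "minor interaction"].any
        (fun term => PySem.Str.isIn term lower) then
    some "minor"
  else if PySem.Str.isIn "minor" lower &&
      ["interaction", "severity", "risk"].any (fun term => PySem.Str.isIn term lower) then
    some "minor"
  else
    none

-- ===== PORT B =====
-- the 'for level in (...)' loop: first level whose bracket-tag or keyword+context fires
def pvLevelLoop (lower : String) (hasContext : Bool) : List String → Option String
  | [] => none
  | level :: rest =>
    if PySem.Str.isIn ("[" ++ level ++ "]") lower ||
        (PySem.Str.isIn level lower && hasContext) then
      some level
    else
      pvLevelLoop lower hasContext rest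

def detect_severity_py_alt (line : String) : Option String :=
  let lower := PySem.Str.lower line
  if ["contraindicated", "do not use", "avoid combination",
      "never use together", "absolute contraindication"].any
        (fun term => PySem.Str.isIn term lower) then
    some "contraindicated"
  else
    let hasContext := ["interaction", "severity", "risk"].any
      (fun w => PySem.Str.isIn w lower)
    pvLevelLoop lower hasContext ["major", "moderate", "minor"]

-- ===== PRECONDITION & SPEC =====
def Spec_detect_severity_py (line : String) (out : Option String) : Prop := out = detect_severity_py_alt line
instance (line : String) (out : Option String) : Decidable (Spec_detect_severity_py line out) := by unfold Spec_detect_severity_py; infer_instance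

-- ===== CLAIM =====
def Claim_equal_detect_severity_py : Prop := ∀ (line : String), Dom_detect_severity_py line → Spec_detect_severity_py line (detect_severity_py line)

-- ===== LEMMAS AND PROOFS =====
-- a substring of a detected phrase is itself detected
theorem pv_isIn_mono (a b lower : String) (h : a.toList <:+: b.toList)
    (hb : PySem.Str.isIn b lower = true) : PySem.Str.isIn a lower = true := by
  rw [PySem.Str.isIn_iff_infix] at hb ⊢
  exact h.trans hb

-- ===== VERDICT =====
set_option maxHeartbeats 2000000 in
theorem detect_severity_py_spec : Claim_equal_detect_severity_py := by
  intro line _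
  unfold Spec_detect_severity_py detect_severity_py detect_severity_py_alt
  set lower := PySem.Str.lower line with hlow
  have h1 := pv_isIn_mono "major" "severity: major" lower (by decide)
  have h2 := pv_isIn_mono "severity" "severity: major" lower (by decide)
  have h3 := pv_isIn_mono "major" "major interaction" lower (by decide)
  have h4 := pv_isIn_mono "interaction" "major interaction" lower (by decide)
  have h5 := pv_isIn_mono "moderate" "severity: moderate" lower (by decide)
  have h6 := pv_isIn_mono "severity" "severity: moderate" lower (by decide)
  have h7 := pv_isIn_mono "moderate" "moderate interaction" lower (by decide)
  have h8 := pv_isIn_mono "interaction" "moderate interaction" lower (by decide)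
  have h9 := pv_isIn_mono "minor" "severity: minor" lower (by decide)
  have h10 := pv_isIn_mono "severity" "severity: minor" lower (by decide)
  have h11 := pv_isIn_mono "minor" "minor interaction" lower (by decide)
  have h12 := pv_isIn_mono "interaction" "minor interaction" lower (by decide)
  simp only [pvLevelLoop, List.any_cons, List.any_nil, Bool.or_false,
    show ("[" ++ "major" ++ "]" : String) = "[major]" from rfl,
    show ("[" ++ "moderate" ++ "]" : String) = "[moderate]" from rfl,
    show ("[" ++ "minor" ++ "]" : String) = "[minor]" from rfl]
  cases hA : PySem.Str.isIn "severity: major" lower <;>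
    cases hB : PySem.Str.isIn "major interaction" lower <;>
      cases hC : PySem.Str.isIn "severity: moderate" lower <;>
        cases hD : PySem.Str.isIn "moderate interaction" lower <;>
          cases hE : PySem.Str.isIn "severity: minor" lower <;>
            cases hF : PySem.Str.isIn "minor interaction" lower <;>
              simp_all <;> split_ifs <;> simp_all
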